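-- pv_equiv track=rewrite | github.com/jrderuiter/pyim | src/pyim/align/util.py | _group_by_position
-- ===== SOURCE A (Python) =====
-- def _group_by_position(sample_keys, max_dist):
--     sample_keys = iter(sample_keys)
--
--     curr_group = [next(sample_keys)]
--     prev_pos = curr_group[0][1]
--
--     for key in sample_keys:
--         if (key[1] - prev_pos) > max_dist:
--             yield curr_group
--             curr_group = [key]
--         else:
--             curr_group.append(key)
--         prev_pos = key[1]
--
--     yield curr_group
-- ===== SOURCE B (Python) =====
-- def _take_group(head, rest, max_dist):
--     """Return (maximal group starting at head, remaining keys)."""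
--     group = [head]
--     prev = head[1]
--     i = 0
--     while i < len(rest) and rest[i][1] - prev <= max_dist:
--         group.append(rest[i])
--         prev = rest[i][1]
--         i += 1
--     return group, rest[i:]
--
--
-- def _group_by_position(sample_keys, max_dist):
--     it = iter(sample_keys)
--     head = next(it)
--     rest = list(it)
--     while True:
--         group, rest = _take_group(head, rest, max_dist)
--         yield group
--         if not rest:
--             return
--         head = rest[0]
--         rest = rest[1:]
-- ===== Notes on version B (the rewrite author's own statement) =====
-- stated objective: alternative
-- what changed: B repeatedly extracts the maximal within-distance prefix group and recurses on the remainder, instead of A's single pass maintaining a running current-group/previous-position accumulator.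
import Mathlib
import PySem

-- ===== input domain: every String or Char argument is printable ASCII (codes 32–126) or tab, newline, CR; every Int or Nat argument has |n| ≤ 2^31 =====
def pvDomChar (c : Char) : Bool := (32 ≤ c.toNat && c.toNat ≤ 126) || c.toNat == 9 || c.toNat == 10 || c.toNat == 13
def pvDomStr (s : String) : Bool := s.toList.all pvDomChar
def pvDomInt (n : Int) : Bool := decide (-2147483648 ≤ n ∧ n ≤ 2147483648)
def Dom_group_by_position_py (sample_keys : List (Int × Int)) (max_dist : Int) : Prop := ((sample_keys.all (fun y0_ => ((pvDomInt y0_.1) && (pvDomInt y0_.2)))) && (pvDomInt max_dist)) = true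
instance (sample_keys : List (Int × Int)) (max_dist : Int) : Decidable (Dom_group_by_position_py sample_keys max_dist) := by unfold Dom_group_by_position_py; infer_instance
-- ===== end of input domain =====

-- B extracts the maximal within-distance prefix group repeatedly instead of A's single accumulator pass (alternative decomposition, same cost).


-- ===== PORT A =====
-- A: one pass over the tail, maintaining (finished groups, current group, previous position).
def group_by_position_py (sample_keys : List (Int × Int)) (max_dist : Int) : List (List (Int × Int)) :=
  match sample_keys with
  | [] => []   -- next() raises on an empty iterator; excluded by Pre_
  | k0 :: rest =>
    let s := rest.foldl
      (fun (st : List (List (Int × Int)) × List (Int × Int) × Int) key =>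
        if key.2 - st.2.2 > max_dist then (st.1 ++ [st.2.1], [key], key.2)
        else (st.1, st.2.1 ++ [key], key.2))
      ([], [k0], k0.2)
    s.1 ++ [s.2.1]

-- ===== PORT B =====
-- B helper: maximal group starting at `head`, and the remaining keys (port of _take_group's scan).
def pvTakeGroup (max_dist : Int) (prev : Int) : List (Int × Int) → List (Int × Int) × List (Int × Int)
  | [] => ([], [])
  | k :: t =>
    if k.2 - prev ≤ max_dist then
      let s := pvTakeGroup max_dist k.2 t
      (k :: s.1, s.2)
    else ([], k :: t)

theorem pvTakeGroup_len (max_dist prev : Int) (l : List (Int × Int)) :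
    (pvTakeGroup max_dist prev l).2.length ≤ l.length := by
  induction l generalizing prev with
  | nil => simp [pvTakeGroup]
  | cons k t ih =>
    simp only [pvTakeGroup]
    split
    · exact Nat.le_succ_of_le (ih k.2)
    · simp

-- B's driving loop: emit the group, continue on the remainder.
def pvGroups (max_dist : Int) (head : Int × Int) (rest : List (Int × Int)) : List (List (Int × Int)) :=
  let s := pvTakeGroup max_dist head.2 rest
  (head :: s.1) ::
    (match h : s.2 with
     | [] => []
     | k :: t => pvGroups max_dist k t)
termination_by rest.length
decreasing_by
  have hl := pvTakeGroup_len max_dist head.2 rest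
  rw [h] at hl
  simp only [List.length_cons] at hl
  omega

def group_by_position_py_alt (sample_keys : List (Int × Int)) (max_dist : Int) : List (List (Int × Int)) :=
  match sample_keys with
  | [] => []   -- next() raises on an empty iterator; excluded by Pre_
  | head :: rest => pvGroups max_dist head rest

-- ===== PRECONDITION & SPEC =====
-- Pre_ excludes only the empty list, on which A (and B) raise RuntimeError (StopIteration from next()).
def Pre_group_by_position_py (sample_keys : List (Int × Int)) (_max_dist : Int) : Prop := sample_keys ≠ []
instance (sample_keys : List (Int × Int)) (max_dist : Int) : Decidable (Pre_group_by_position_py sample_keys max_dist) := by unfold Pre_group_by_position_py; infer_instance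
def pvWitness_group_by_position_py : (List (Int × Int)) × Int := ([(1, 10), (2, 12), (3, 30)], 5)

def Spec_group_by_position_py (sample_keys : List (Int × Int)) (max_dist : Int) (out : List (List (Int × Int))) : Prop := out = group_by_position_py_alt sample_keys max_dist
instance (sample_keys : List (Int × Int)) (max_dist : Int) (out : List (List (Int × Int))) : Decidable (Spec_group_by_position_py sample_keys max_dist out) := by unfold Spec_group_by_position_py; infer_instance

-- ===== CLAIM (what is proved, stated in full; the proofs are below) =====
def Claim_equal_group_by_position_py : Prop := ∀ (sample_keys : List (Int × Int)) (max_dist : Int), Dom_group_by_position_py sample_keys max_dist → Pre_group_by_position_py sample_keys max_dist → Spec_group_by_position_py sample_keys max_dist (group_by_position_py sample_keys max_dist)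

-- ===== LEMMAS AND PROOFS =====

-- Recursive characterisation of A's fold-and-flush.
def pvGather (max_dist : Int) (curr : List (Int × Int)) (prev : Int) : List (Int × Int) → List (List (Int × Int))
  | [] => [curr]
  | k :: t =>
    if k.2 - prev > max_dist then curr :: pvGather max_dist [k] k.2 t
    else pvGather max_dist (curr ++ [k]) k.2 t

theorem foldA_gather (max_dist : Int) (rest : List (Int × Int))
    (groups : List (List (Int × Int))) (curr : List (Int × Int)) (prev : Int) :
    (let s := rest.foldl
      (fun (st : List (List (Int × Int)) × List (Int × Int) × Int) key =>
        if key.2 - st.2.2 > max_dist then (st.1 ++ [st.2.1], [key], key.2)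
        else (st.1, st.2.1 ++ [key], key.2))
      (groups, curr, prev)
     s.1 ++ [s.2.1]) = groups ++ pvGather max_dist curr prev rest := by
  induction rest generalizing groups curr prev with
  | nil => simp [pvGather]
  | cons k t ih =>
    simp only [List.foldl_cons, pvGather]
    by_cases h : k.2 - prev > max_dist
    · simp only [h, ih]
      simp
    · simp only [h, if_false, ih]

theorem pvGroups_eq (max_dist : Int) (head : Int × Int) (rest : List (Int × Int)) :
    pvGroups max_dist head rest =
      (head :: (pvTakeGroup max_dist head.2 rest).1) ::
        (match (pvTakeGroup max_dist head.2 rest).2 with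
         | [] => []
         | k :: t => pvGroups max_dist k t) := by
  rw [pvGroups]
  cases hs : (pvTakeGroup max_dist head.2 rest).2 <;> simp [hs]

theorem gather_groups (max_dist : Int) (rest : List (Int × Int))
    (curr : List (Int × Int)) (prev : Int) :
    pvGather max_dist curr prev rest =
      (curr ++ (pvTakeGroup max_dist prev rest).1) ::
        (match (pvTakeGroup max_dist prev rest).2 with
         | [] => []
         | k :: t => pvGroups max_dist k t) := by
  induction rest generalizing curr prev with
  | nil => simp [pvGather, pvTakeGroup]
  | cons k t ih =>
    simp only [pvGather, pvTakeGroup]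
    by_cases h : k.2 - prev ≤ max_dist
    · have h' : ¬ (k.2 - prev > max_dist) := by omega
      simp only [if_neg h', if_pos h, ih]
      simp
    · have h' : k.2 - prev > max_dist := by omega
      simp only [if_pos h', if_neg h]
      rw [ih [k] k.2, pvGroups_eq]
      simp

-- ===== VERDICT (by name: the statement is the Claim_ definition above) =====
theorem group_by_position_py_spec : Claim_equal_group_by_position_py := by
  intro sample_keys max_dist _ hpre
  unfold Spec_group_by_position_py group_by_position_py group_by_position_py_alt
  match sample_keys with
  | [] => exact absurd rfl hpre
  | k0 :: rest =>
    simp only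
    rw [foldA_gather max_dist rest [] [k0] k0.2, gather_groups, pvGroups_eq]
    simp
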